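-- pv_equiv track=rewrite | github.com/verasun/investmanager | src/memory/preference_extractor.py | detect_option_selection
-- ===== SOURCE A (Python) =====
-- from typing import Optional
--
-- def detect_option_selection(
--     message: str, options: list[str]
-- ) -> Optional[int]:
--     """Detect which option the user selected.
--
--     Args:
--         message: User's message
--         options: List of option strings
--
--     Returns:
--         Index of selected option, or None if not detected
--     """
--     message = message.strip()
--
--     # Try exact match
--     for i, option in enumerate(options):
--         if message == option:
--             return i
--
--     # Try number selection (1, 2, 3...)
--     if message.isdigit():
--         idx = int(message) - 1
--         if 0 <= idx < len(options):
--             return idx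
--
--     # Try partial match
--     for i, option in enumerate(options):
--         if message in option or option in message:
--             return i
--
--     return None
-- ===== SOURCE B (Python) =====
-- from typing import Optional
--
--
-- def detect_option_selection(
--     message: str, options: list[str]
-- ) -> Optional[int]:
--     """Single pass over options tracking the first exact and the first
--     partial match; exact > number > partial priority preserved."""
--     message = message.strip()
--
--     exact = None
--     partial = None
--     for i, option in enumerate(options):
--         if exact is None and message == option:
--             exact = i
--         if partial is None and (message in option or option in message):
--             partial = i
--
--     if exact is not None:
--         return exact
--
--     if message.isdigit():
--         idx = int(message) - 1
--         if 0 <= idx < len(options):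
--             return idx
--
--     return partial
-- ===== Notes on version B (the rewrite author's own statement) =====
-- stated objective: alternative
-- what changed: Replaces A's two separate scans over options (an exact-match scan, then a partial-match scan after the digit check) with a single traversal that records the first exact and first partial match indices, then applies the exact > numeric > partial priority once at the end.
import Mathlib
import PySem

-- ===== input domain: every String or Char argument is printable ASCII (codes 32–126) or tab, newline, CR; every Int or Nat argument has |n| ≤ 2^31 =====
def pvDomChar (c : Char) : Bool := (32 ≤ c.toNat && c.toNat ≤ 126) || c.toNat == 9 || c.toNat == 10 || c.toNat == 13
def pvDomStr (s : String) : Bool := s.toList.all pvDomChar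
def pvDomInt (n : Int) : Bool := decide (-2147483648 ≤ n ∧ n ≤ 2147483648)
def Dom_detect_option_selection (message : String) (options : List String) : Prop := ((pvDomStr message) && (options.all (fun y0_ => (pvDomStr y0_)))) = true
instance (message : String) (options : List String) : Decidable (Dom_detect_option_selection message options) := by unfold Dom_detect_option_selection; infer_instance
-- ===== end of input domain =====

-- B replaces A's two separate scans over `options` with a single pass that records the
-- first exact-match and first partial-match indices (alternative decomposition, same cost).

-- ===== PORT A =====
-- A's first loop: return the index of the first option equal to message
def dosA_exact (m : String) : List String → Int → Option Int
  | [], _ => none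
  | o :: rest, i => if m = o then some i else dosA_exact m rest (i + 1)

-- A's second loop: first index with a substring match in either direction
def dosA_partial (m : String) : List String → Int → Option Int
  | [], _ => none
  | o :: rest, i =>
      if PySem.Str.isIn m o || PySem.Str.isIn o m then some i
      else dosA_partial m rest (i + 1)

def detect_option_selection (message : String) (options : List String) : Option Int :=
  let m := PySem.Str.strip message
  match dosA_exact m options 0 with
  | some i => some i
  | none =>
      if PySem.Str.strIsdigit m then
        let idx := (PySem.Int.ofStr? m).getD 0 - 1
        if 0 ≤ idx ∧ idx < (options.length : Int) then some idx
        else dosA_partial m options 0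
      else dosA_partial m options 0

-- ===== PORT B =====
-- B's single pass: carry (first exact index?, first partial index?) through one traversal
def dosB_scan (m : String) : List String → Int → Option Int × Option Int → Option Int × Option Int
  | [], _, st => st
  | o :: rest, i, (e, p) =>
      dosB_scan m rest (i + 1)
        (if e = none ∧ m = o then some i else e,
         if p = none ∧ (PySem.Str.isIn m o || PySem.Str.isIn o m) then some i else p)

def detect_option_selection_alt (message : String) (options : List String) : Option Int :=
  let m := PySem.Str.strip message
  match dosB_scan m options 0 (none, none) with
  | (some e, _) => some e
  | (none, p) =>
      if PySem.Str.strIsdigit m then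
        let idx := (PySem.Int.ofStr? m).getD 0 - 1
        if 0 ≤ idx ∧ idx < (options.length : Int) then some idx
        else p
      else p

-- ===== PRECONDITION & SPEC =====
def Spec_detect_option_selection (message : String) (options : List String) (out : Option Int) : Prop := out = detect_option_selection_alt message options
instance (message : String) (options : List String) (out : Option Int) : Decidable (Spec_detect_option_selection message options out) := by unfold Spec_detect_option_selection; infer_instance

-- ===== CLAIM (what is proved, stated in full; the proofs are below) =====
def Claim_equal_detect_option_selection : Prop := ∀ (message : String) (options : List String), Dom_detect_option_selection message options → Spec_detect_option_selection message options (detect_option_selection message options)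

-- ===== LEMMAS AND PROOFS =====
lemma dosB_scan_spec (m : String) (l : List String) (i : Int) (e p : Option Int) :
    dosB_scan m l i (e, p) =
      (e.orElse (fun _ => dosA_exact m l i), p.orElse (fun _ => dosA_partial m l i)) := by
  induction l generalizing i e p with
  | nil => simp [dosB_scan, dosA_exact, dosA_partial]
  | cons o rest ih =>
      simp only [dosB_scan, dosA_exact, dosA_partial, ih]
      cases e <;> cases p <;>
        by_cases hm : m = o <;>
          by_cases hc : (PySem.Str.isIn m o || PySem.Str.isIn o m) = true <;>
            simp_all [Option.orElse]

-- ===== VERDICT (by name: the statement is the Claim_ definition above) =====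
theorem detect_option_selection_spec : Claim_equal_detect_option_selection := by
  intro message options _
  unfold Spec_detect_option_selection detect_option_selection detect_option_selection_alt
  simp only [dosB_scan_spec]
  cases h : dosA_exact (PySem.Str.strip message) options 0 <;>
    simp [Option.orElse]
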